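-- pv_equiv track=rewrite | github.com/mr-bin/scripts | work/mapconverter.py | items_work_area
-- ===== SOURCE A (Python) =====
-- def items_work_area(tiles, data, tile_width, tile_height, ground_height):
--     start_point = tile_width * ground_height
--     end_point = start_point + tiles*tile_height*tile_width
--     #рабочая область одномерным массивом
--     plain_work_area = data[start_point:end_point]
--
--     #рабочая область в двумерном моссиве со строкой равной ширене тайла
--     work_area = []
--     for j in range(0, tiles*tile_height):
--         start_str_point = j * tile_width
--         end_str_point = (j + 1) * tile_width
--         work_area.append(plain_work_area[start_str_point:end_str_point])
--
--     #рабочая область с делением на тайлы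
--     work_area_by_layers = {}
--     for k in range(0, tiles):
--         start_layer_point = k * tile_height
--         end_layer_point = (k + 1) * tile_height
--         work_area_by_layers[k] = work_area[start_layer_point:end_layer_point]
--
--     return work_area_by_layers
-- ===== SOURCE B (Python) =====
-- def items_work_area(tiles, data, tile_width, tile_height, ground_height):
--     # Scatter pass: pre-build the empty tiles/rows skeleton, then route each
--     # element of the work area to its destination row by div/mod arithmetic.
--     start = tile_width * ground_height
--     res = {k: [[] for _ in range(tile_height)] for k in range(tiles)}
--     if tiles > 0 and tile_height > 0 and tile_width > 0:
--         work = data[start : start + tiles * tile_height * tile_width]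
--         for i, v in enumerate(work):
--             row = i // tile_width
--             res[row // tile_height][row % tile_height].append(v)
--     return res
-- ===== Notes on version B (the rewrite author's own statement) =====
-- stated objective: alternative
-- what changed: B replaces A's three-stage slice-and-regroup chunking with a scatter pass: it pre-builds the empty tile/row skeleton and then routes each element of the work area to its tile and row by div/mod index arithmetic in a single loop.
-- intended difference: When tile_width is negative and the selected work area is longer than |tile_width|, A's negative-index slice wraparound accidentally fills tile 0's first row with data (e.g. {0: [[1]]}); B returns the intended empty rows ({0: [[]]}) since a non-positive tile width selects no elements. — e.g. on items_work_area(1, [1, 2, 3], -1, 1, 0): A returns [(0, [[1]])], B returns [(0, [[]])]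
import Mathlib
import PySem

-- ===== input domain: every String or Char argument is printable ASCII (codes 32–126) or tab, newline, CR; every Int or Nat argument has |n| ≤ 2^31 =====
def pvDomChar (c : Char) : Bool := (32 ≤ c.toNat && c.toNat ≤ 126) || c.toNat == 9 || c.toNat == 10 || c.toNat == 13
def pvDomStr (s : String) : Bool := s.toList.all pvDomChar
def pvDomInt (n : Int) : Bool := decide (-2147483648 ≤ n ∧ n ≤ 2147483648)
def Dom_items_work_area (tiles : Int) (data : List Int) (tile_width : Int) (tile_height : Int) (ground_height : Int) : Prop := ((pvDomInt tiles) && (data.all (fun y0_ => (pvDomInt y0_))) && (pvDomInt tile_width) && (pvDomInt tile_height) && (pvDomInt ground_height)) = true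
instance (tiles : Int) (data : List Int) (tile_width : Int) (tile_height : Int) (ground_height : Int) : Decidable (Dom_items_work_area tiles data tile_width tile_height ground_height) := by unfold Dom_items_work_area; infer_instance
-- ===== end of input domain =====

-- B replaces A's slice-and-regroup chunking with a single scatter pass (skeleton dict + div/mod
-- routing of each element); same cost, different algorithm (objective: alternative).

-- ===== PORT A =====
def items_work_area (tiles : Int) (data : List Int) (tile_width : Int) (tile_height : Int) (ground_height : Int) : List (Int × List (List Int)) :=
  let start_point := tile_width * ground_height
  let end_point := start_point + tiles * tile_height * tile_width
  let plain_work_area := PySem.List.slice data (some start_point) (some end_point)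
  let work_area := (PySem.List.pyRange 0 (tiles * tile_height) 1).foldl
    (fun acc j =>
      acc ++ [PySem.List.slice plain_work_area (some (j * tile_width)) (some ((j + 1) * tile_width))]) []
  let work_area_by_layers := (PySem.List.pyRange 0 tiles 1).foldl
    (fun d k =>
      d.insert k (PySem.List.slice work_area (some (k * tile_height)) (some ((k + 1) * tile_height))))
    (PySem.Dict.empty)
  work_area_by_layers.items

-- ===== PORT B =====
def items_work_area_alt (tiles : Int) (data : List Int) (tile_width : Int) (tile_height : Int) (ground_height : Int) : List (Int × List (List Int)) :=
  let start := tile_width * ground_height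
  let res0 := (PySem.List.pyRange 0 tiles 1).foldl
    (fun d k => d.insert k ((PySem.List.pyRange 0 tile_height 1).map (fun _ => ([] : List Int))))
    (PySem.Dict.empty : PySem.Dict Int (List (List Int)))
  let res :=
    if 0 < tiles ∧ 0 < tile_height ∧ 0 < tile_width then
      -- for i, v in enumerate(work): res[row // th][row % th].append(v); under the guard every
      -- touched key and row index exists, so Dict.modify/List.modify are exact for the mutations
      (PySem.List.enumerate (PySem.List.slice data (some start) (some (start + tiles * tile_height * tile_width)))).foldl
        (fun d p =>
          d.modify (PySem.Int.floordiv (PySem.Int.floordiv p.1 tile_width) tile_height) []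
            (fun rows => rows.modify (PySem.Int.mod (PySem.Int.floordiv p.1 tile_width) tile_height).toNat
              (fun r => r ++ [p.2])))
        res0
    else res0
  res.items

-- ===== PRECONDITION & SPEC =====
-- When tile_width is negative and the selected work area is longer than |tile_width|, A's
-- negative-index slice wraparound accidentally fills tile 0's first row with data; B returns the
-- intended empty rows, since a non-positive tile width selects no elements.
def D_items_work_area (tiles : Int) (data : List Int) (tile_width : Int) (tile_height : Int) (ground_height : Int) : Prop :=
  0 < tiles ∧ 0 < tile_height ∧ tile_width < 0 ∧
    0 < (PySem.List.clampIdx data.length (tile_width * ground_height + tiles * tile_height * tile_width) : Int)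
        - (PySem.List.clampIdx data.length (tile_width * ground_height) : Int) + tile_width
instance (tiles : Int) (data : List Int) (tile_width : Int) (tile_height : Int) (ground_height : Int) : Decidable (D_items_work_area tiles data tile_width tile_height ground_height) := by unfold D_items_work_area; infer_instance

def Spec_items_work_area (tiles : Int) (data : List Int) (tile_width : Int) (tile_height : Int) (ground_height : Int) (out : List (Int × List (List Int))) : Prop := ¬ D_items_work_area tiles data tile_width tile_height ground_height → out = items_work_area_alt tiles data tile_width tile_height ground_height
instance (tiles : Int) (data : List Int) (tile_width : Int) (tile_height : Int) (ground_height : Int) (out : List (Int × List (List Int))) : Decidable (Spec_items_work_area tiles data tile_width tile_height ground_height out) := by unfold Spec_items_work_area; infer_instance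

def pvDiffWitness_items_work_area : Int × List Int × Int × Int × Int := (1, [1, 2, 3], -1, 1, 0)
def pvDiffWitnessOut_items_work_area : (List (Int × List (List Int))) × (List (Int × List (List Int))) := ([(0, [[1]])], [(0, [[]])])

-- ===== CLAIM (what is proved, stated in full; the proofs are below) =====
def Claim_unchanged_items_work_area : Prop := ∀ (tiles : Int) (data : List Int) (tile_width : Int) (tile_height : Int) (ground_height : Int), Dom_items_work_area tiles data tile_width tile_height ground_height → Spec_items_work_area tiles data tile_width tile_height ground_height (items_work_area tiles data tile_width tile_height ground_height)
def Claim_changed_items_work_area : Prop := Dom_items_work_area (pvDiffWitness_items_work_area.1) (pvDiffWitness_items_work_area.2.1) (pvDiffWitness_items_work_area.2.2.1) (pvDiffWitness_items_work_area.2.2.2.1) (pvDiffWitness_items_work_area.2.2.2.2) ∧ D_items_work_area (pvDiffWitness_items_work_area.1) (pvDiffWitness_items_work_area.2.1) (pvDiffWitness_items_work_area.2.2.1) (pvDiffWitness_items_work_area.2.2.2.1) (pvDiffWitness_items_work_area.2.2.2.2) ∧ items_work_area (pvDiffWitness_items_work_area.1) (pvDiffWitness_items_work_area.2.1) (pvDiffWitness_items_work_area.2.2.1)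 (pvDiffWitness_items_work_area.2.2.2.1) (pvDiffWitness_items_work_area.2.2.2.2) = pvDiffWitnessOut_items_work_area.1 ∧ items_work_area_alt (pvDiffWitness_items_work_area.1) (pvDiffWitness_items_work_area.2.1) (pvDiffWitness_items_work_area.2.2.1) (pvDiffWitness_items_work_area.2.2.2.1) (pvDiffWitness_items_work_area.2.2.2.2) = pvDiffWitnessOut_items_work_area.2 ∧ pvDiffWitnessOut_items_work_area.1 ≠ pvDiffWitnessOut_items_work_area.2
def Claim_exact_items_work_area : Prop := ∀ (tiles : Int) (data : List Int) (tile_width : Int) (tile_height : Int) (ground_height : Int), Dom_items_work_area tiles data tile_width tile_height ground_height → D_items_work_area tiles data tile_width tile_height ground_height → items_work_area tiles data tile_width tile_height ground_height ≠ items_work_area_alt tiles data tile_width tile_height ground_height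

-- ===== LEMMAS AND PROOFS =====

-- The closed description of A's result: nested maps of row slices of the work area.
def pvTarget (plain : List Int) (tiles th tw : Int) : List (Int × List (List Int)) :=
  (PySem.List.pyRange 0 tiles 1).map (fun k =>
    (k, (PySem.List.pyRange 0 th 1).map (fun j =>
      PySem.List.slice plain (some ((k * th + j) * tw)) (some ((k * th + j + 1) * tw)))))

-- A slice of a mapped range is the map over the sub-range.
theorem pv_slice_map_pyRange {α : Type} (f : Int → α) (n a b : Int)
    (h0 : 0 ≤ a) (hab : a ≤ b) (hbn : b ≤ n) :
    PySem.List.slice ((PySem.List.pyRange 0 n 1).map f) (some a) (some b)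
      = (PySem.List.pyRange a b 1).map f := by
  have hsplit : PySem.List.pyRange 0 n 1
      = PySem.List.pyRange 0 a 1 ++ (PySem.List.pyRange a b 1 ++ PySem.List.pyRange b n 1) := by
    rw [← PySem.List.pyRange_one_append a b n hab hbn,
        ← PySem.List.pyRange_one_append 0 a n h0 (le_trans hab hbn)]
  have hla : (PySem.List.pyRange 0 a 1).length = a.toNat := by
    simp [PySem.List.length_pyRange_one]
  have hlb : (PySem.List.pyRange a b 1).length = (b - a).toNat :=
    PySem.List.length_pyRange_one a b
  rw [PySem.List.slice_toNat _ h0 (le_trans h0 hab), hsplit]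
  simp only [List.map_append]
  have hla' : ((PySem.List.pyRange 0 a 1).map f).length = a.toNat := by simp [hla]
  have hdrop : ((PySem.List.pyRange 0 a 1).map f ++ ((PySem.List.pyRange a b 1).map f ++ (PySem.List.pyRange b n 1).map f)).drop a.toNat = (PySem.List.pyRange a b 1).map f ++ (PySem.List.pyRange b n 1).map f := by
    rw [← hla']; exact List.drop_left
  rw [hdrop]
  have hlb' : ((PySem.List.pyRange a b 1).map f).length = b.toNat - a.toNat := by
    simp only [List.length_map, hlb]; omega
  rw [← hlb', List.take_left]

-- One layer of A (a slice of the flat row list) is the inner row list of pvTarget.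
theorem pv_layer_eq (plain : List Int) (tiles tile_height tile_width k : Int)
    (hk0 : 0 ≤ k) (hk : k < tiles) :
    PySem.List.slice
      ((PySem.List.pyRange 0 (tiles * tile_height) 1).map (fun j =>
        PySem.List.slice plain (some (j * tile_width)) (some ((j + 1) * tile_width))))
      (some (k * tile_height)) (some ((k + 1) * tile_height))
    = (PySem.List.pyRange 0 tile_height 1).map (fun j =>
        PySem.List.slice plain
          (some ((k * tile_height + j) * tile_width))
          (some ((k * tile_height + j + 1) * tile_width))) := by
  by_cases hth : tile_height ≤ 0
  · have h1 : PySem.List.pyRange 0 (tiles * tile_height) 1 = [] :=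
      PySem.List.pyRange_one_eq_nil (by nlinarith)
    have h2 : PySem.List.pyRange 0 tile_height 1 = [] :=
      PySem.List.pyRange_one_eq_nil hth
    rw [h1, h2]
    simp [PySem.List.slice]
  · have hth' : 0 < tile_height := by omega
    have h0 : 0 ≤ k * tile_height := by positivity
    have hab : k * tile_height ≤ (k + 1) * tile_height := by nlinarith [hth']
    have hbn : (k + 1) * tile_height ≤ tiles * tile_height := by nlinarith [hth']
    rw [pv_slice_map_pyRange _ _ _ _ h0 hab hbn]
    have h1 : ((k + 1) * tile_height - k * tile_height) = tile_height := by ring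
    rw [PySem.List.pyRange_one, PySem.List.pyRange_one, h1]
    simp only [List.map_map, Int.sub_zero]
    apply List.map_congr_left
    intro i _
    simp only [Function.comp]
    have e1 : k * tile_height + ((0 : Int) + (i : Int)) = k * tile_height + (i : Int) := by ring
    rw [e1]

-- A computes pvTarget of the work area, on every input.
theorem pv_A_eq_target (tiles : Int) (data : List Int) (tile_width tile_height ground_height : Int) :
    items_work_area tiles data tile_width tile_height ground_height
      = pvTarget (PySem.List.slice data (some (tile_width * ground_height))
          (some (tile_width * ground_height + tiles * tile_height * tile_width))) tiles tile_height tile_width := by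
  unfold items_work_area pvTarget
  simp only []
  rw [PySem.List.foldl_append_singleton_eq_map, List.nil_append]
  have hfold := PySem.Dict.items_foldl_insert_fresh
        (l := PySem.List.pyRange 0 tiles 1)
        (d := (PySem.Dict.empty : PySem.Dict Int (List (List Int))))
        (k := fun (x : Int) => x)
        (v := fun k => PySem.List.slice
          ((PySem.List.pyRange 0 (tiles * tile_height) 1).map (fun j =>
            PySem.List.slice (PySem.List.slice data (some (tile_width * ground_height))
              (some (tile_width * ground_height + tiles * tile_height * tile_width)))
              (some (j * tile_width)) (some ((j + 1) * tile_width))))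
          (some (k * tile_height)) (some ((k + 1) * tile_height)))
        (by intro a _; simp)
        (by simpa using PySem.List.nodup_pyRange_one 0 tiles)
  simp only [] at hfold
  rw [hfold]
  simp only [PySem.Dict.empty, List.nil_append]
  apply List.map_congr_left
  intro k hk
  have hmem := (PySem.List.mem_pyRange_one).1 hk
  rw [pv_layer_eq _ tiles tile_height tile_width k hmem.1 hmem.2]

-- Appending one element extends exactly the window that covers its index.
theorem pv_take_drop_snoc {α : Type} (ys : List α) (x : α) (a w : Nat) :
    List.take w (List.drop a (ys ++ [x])) =
    List.take w (List.drop a ys) ++ (if a ≤ ys.length ∧ ys.length < a + w then [x] else []) := by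
  rw [List.drop_append, List.take_append]
  have hlen : (List.drop a ys).length = ys.length - a := by simp
  by_cases h1 : a ≤ ys.length
  · have hd : a - ys.length = 0 := by omega
    rw [hd, List.drop_zero]
    by_cases h2 : ys.length < a + w
    · rw [if_pos ⟨h1, h2⟩]
      congr 1
      exact List.take_of_length_le (by simp only [List.length_singleton, hlen]; omega)
    · rw [if_neg (by tauto)]
      have h3 : w - (List.drop a ys).length = 0 := by rw [hlen]; omega
      rw [h3, List.take_zero]
  · have hd2 : List.drop (a - ys.length) ([x]) = [] := List.drop_eq_nil_of_le (by simp; omega)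
    rw [hd2, List.take_nil, if_neg (by tauto)]

theorem pv_slice_snoc (ys : List Int) (x : Int) (a b : Int) (h0 : 0 ≤ a) (hab : a ≤ b) :
    PySem.List.slice (ys ++ [x]) (some a) (some b) =
    PySem.List.slice ys (some a) (some b) ++
      (if a ≤ (ys.length : Int) ∧ (ys.length : Int) < b then [x] else []) := by
  rw [PySem.List.slice_toNat _ h0 (le_trans h0 hab), PySem.List.slice_toNat _ h0 (le_trans h0 hab),
      pv_take_drop_snoc]
  congr 1
  by_cases h : a ≤ (ys.length : Int) ∧ (ys.length : Int) < b
  · rw [if_pos (by omega), if_pos h]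
  · rw [if_neg (by omega), if_neg h]

theorem pv_keys_insert_of_contains {κ ν : Type} [BEq κ] [LawfulBEq κ] (d : PySem.Dict κ ν) (k : κ) (v : ν)
    (h : d.contains k = true) : (d.insert k v).keys = d.keys := by
  have hi := PySem.Dict.items_insert_of_contains d v h
  simp only [PySem.Dict.keys, hi, List.map_map]
  apply List.map_congr_left
  intro p _
  simp only [Function.comp]
  by_cases hp : p.1 == k
  · simp only [hp, if_pos]; exact (eq_of_beq hp).symm
  · simp [hp]

theorem pv_window_unique (m tw q : Int) (hw : 0 < tw) (h1 : q * tw ≤ m) (h2 : m < (q + 1) * tw) :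
    m / tw = q := by
  have ha : q ≤ m / tw := (Int.le_ediv_iff_mul_le hw).2 h1
  have hb : m / tw < q + 1 := (Int.ediv_lt_iff_lt_mul hw).2 h2
  omega

theorem pv_slice_nil {α : Type} (a b : Int) :
    PySem.List.slice ([] : List α) (some a) (some b) = [] := by
  apply List.eq_nil_of_length_eq_zero
  rw [PySem.List.length_slice]
  have ha := PySem.List.clampIdx_le ([] : List α).length a
  have hb := PySem.List.clampIdx_le ([] : List α).length b
  simp only [List.length_nil] at ha hb ⊢
  omega

theorem pv_res0_target (tiles th tw : Int) :
    ((PySem.List.pyRange 0 tiles 1).foldl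
      (fun d k => d.insert k ((PySem.List.pyRange 0 th 1).map (fun _ => ([] : List Int))))
      (PySem.Dict.empty : PySem.Dict Int (List (List Int)))).items
    = pvTarget [] tiles th tw := by
  have hfold := PySem.Dict.items_foldl_insert_fresh
        (l := PySem.List.pyRange 0 tiles 1)
        (d := (PySem.Dict.empty : PySem.Dict Int (List (List Int))))
        (k := fun (x : Int) => x)
        (v := fun _ => (PySem.List.pyRange 0 th 1).map (fun _ => ([] : List Int)))
        (by intro a _; simp)
        (by simpa using PySem.List.nodup_pyRange_one 0 tiles)
  rw [hfold]
  simp only [PySem.Dict.empty, List.nil_append]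
  unfold pvTarget
  apply List.map_congr_left
  intro k _
  congr 1
  apply List.map_congr_left
  intro j _
  rw [pv_slice_nil]

-- One scatter step: appending element x (at index m) updates exactly row (m//tw)%th of tile (m//tw)//th.
theorem pv_modify_step (tiles th tw : Int) (hh : 0 < th) (hw : 0 < tw)
    (m : Int) (hm0 : 0 ≤ m) (hm : m < tiles * th * tw)
    (ys : List Int) (x : Int) (hmys : m = (ys.length : Int))
    (X : PySem.Dict Int (List (List Int))) (hX : X.items = pvTarget ys tiles th tw) :
    (X.modify ((m / tw) / th) [] (fun rows => rows.modify ((m / tw) % th).toNat (fun r => r ++ [x]))).items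
      = pvTarget (ys ++ [x]) tiles th tw := by
  have hrow0 : 0 ≤ m / tw := Int.ediv_nonneg hm0 hw.le
  have hrowlt : m / tw < tiles * th := (Int.ediv_lt_iff_lt_mul hw).2 hm
  have ht0 : 0 ≤ (m / tw) / th := Int.ediv_nonneg hrow0 hh.le
  have htlt : (m / tw) / th < tiles := (Int.ediv_lt_iff_lt_mul hh).2 hrowlt
  have hr0 : 0 ≤ (m / tw) % th := Int.emod_nonneg _ (ne_of_gt hh)
  have hrlt : (m / tw) % th < th := Int.emod_lt_of_pos _ hh
  have hdecomp : m / tw = ((m / tw) / th) * th + (m / tw) % th := by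
    have h := Int.mul_ediv_add_emod (m / tw) th
    have hc : ((m / tw) / th) * th = th * ((m / tw) / th) := mul_comm _ _
    linarith [h, hc]
  have hwin1 : (m / tw) * tw ≤ m := by
    have h := Int.mul_ediv_add_emod m tw
    have h1 := Int.emod_nonneg m (ne_of_gt hw)
    have hc : (m / tw) * tw = tw * (m / tw) := mul_comm _ _
    linarith [h, h1, hc]
  have hwin2 : m < ((m / tw) + 1) * tw := by
    have h := Int.mul_ediv_add_emod m tw
    have h2 := Int.emod_lt_of_pos m hw
    have hc : ((m / tw) + 1) * tw = tw * (m / tw) + tw := by ring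
    linarith [h, h2, hc]
  have hkeys : X.keys = PySem.List.pyRange 0 tiles 1 := by
    simp [PySem.Dict.keys, hX, pvTarget, List.map_map, Function.comp_def]
  have hnodup : X.keys.Nodup := by rw [hkeys]; exact PySem.List.nodup_pyRange_one 0 tiles
  have htmem : ((m / tw) / th) ∈ PySem.List.pyRange 0 tiles 1 := by
    rw [PySem.List.mem_pyRange_one]; exact ⟨ht0, htlt⟩
  have hcont : X.contains ((m / tw) / th) = true := by
    rw [PySem.Dict.contains_eq_decide_mem_keys, hkeys]
    simpa using htmem
  have hgetD : ∀ k : Int, k ∈ PySem.List.pyRange 0 tiles 1 →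
      X.getD k [] = (PySem.List.pyRange 0 th 1).map (fun j =>
        PySem.List.slice ys (some ((k * th + j) * tw)) (some ((k * th + j + 1) * tw))) := by
    intro k hk
    exact PySem.Dict.getD_of_mem_items X (by rw [hX]; unfold pvTarget; exact List.mem_map_of_mem hk) hnodup []
  have hkeys' : (X.modify ((m / tw) / th) [] (fun rows => rows.modify ((m / tw) % th).toNat (fun r => r ++ [x]))).keys
      = PySem.List.pyRange 0 tiles 1 := by
    rw [PySem.Dict.keys_modify, pv_keys_insert_of_contains _ _ _ hcont, hkeys]
  have hnd' : (X.modify ((m / tw) / th) [] (fun rows => rows.modify ((m / tw) % th).toNat (fun r => r ++ [x]))).keys.Nodup := by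
    rw [hkeys']; exact PySem.List.nodup_pyRange_one 0 tiles
  rw [PySem.Dict.items_eq_map_keys _ hnd' [], hkeys']
  unfold pvTarget
  apply List.map_congr_left
  intro k hk
  have hkmem := (PySem.List.mem_pyRange_one).1 hk
  rw [PySem.Dict.getD_modify]
  congr 1
  by_cases hkt : k = (m / tw) / th
  · rw [if_pos hkt, hgetD _ htmem, hkt]
    apply List.ext_getElem
    · simp [List.length_modify]
    · intro j hj1 hj2
      simp only [List.getElem_modify, List.getElem_map, PySem.List.pyRange_one, Int.sub_zero,
        List.getElem_range, zero_add]
      have hjth : (j : Int) < th := by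
        simp only [List.length_map, PySem.List.length_pyRange_one, List.length_modify, Int.sub_zero] at hj1
        omega
      have ha0 : (0 : Int) ≤ (((m / tw) / th) * th + (j : Int)) * tw := by
        have h1 : (0 : Int) ≤ ((m / tw) / th) * th + (j : Int) :=
          add_nonneg (mul_nonneg ht0 hh.le) (Int.natCast_nonneg j)
        exact mul_nonneg h1 hw.le
      have hab : (((m / tw) / th) * th + (j : Int)) * tw ≤ (((m / tw) / th) * th + (j : Int) + 1) * tw := by
        nlinarith [hw]
      rw [pv_slice_snoc ys x _ _ ha0 hab]
      by_cases hjr : ((m / tw) % th).toNat = j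
      · rw [if_pos hjr]
        have hjval : (j : Int) = (m / tw) % th := by omega
        have hsum : ((m / tw) / th) * th + (j : Int) = m / tw := by linarith [hdecomp, hjval]
        rw [if_pos ?_]
        constructor
        · calc (((m / tw) / th) * th + (j : Int)) * tw = (m / tw) * tw := by rw [hsum]
            _ ≤ m := hwin1
            _ = (ys.length : Int) := hmys
        · calc (ys.length : Int) = m := hmys.symm
            _ < ((m / tw) + 1) * tw := hwin2
            _ = (((m / tw) / th) * th + (j : Int) + 1) * tw := by rw [hsum]
      · rw [if_neg hjr, if_neg ?_, List.append_nil]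
        rintro ⟨hc1, hc2⟩
        rw [← hmys] at hc1 hc2
        have hq : m / tw = ((m / tw) / th) * th + (j : Int) :=
          pv_window_unique m tw _ hw hc1 hc2
        have : (j : Int) = (m / tw) % th := by linarith [hdecomp, hq]
        omega
  · rw [if_neg hkt, hgetD k hk]
    apply List.map_congr_left
    intro j hj
    have hjmem := (PySem.List.mem_pyRange_one).1 hj
    have ha0 : (0 : Int) ≤ (k * th + j) * tw := by
      have h1 : (0 : Int) ≤ k * th + j :=
        add_nonneg (mul_nonneg hkmem.1 hh.le) hjmem.1
      exact mul_nonneg h1 hw.le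
    have hab : (k * th + j) * tw ≤ (k * th + j + 1) * tw := by nlinarith [hw]
    rw [pv_slice_snoc ys x _ _ ha0 hab, if_neg ?_, List.append_nil]
    rintro ⟨hc1, hc2⟩
    rw [← hmys] at hc1 hc2
    have hq : m / tw = k * th + j :=
      pv_window_unique m tw _ hw hc1 hc2
    have heqn : k * th + j = ((m / tw) / th) * th + (m / tw) % th := by linarith [hq, hdecomp]
    rcases lt_trichotomy k ((m / tw) / th) with hlt | heq | hgt
    · have h2 : (k + 1) * th ≤ ((m / tw) / th) * th :=
        mul_le_mul_of_nonneg_right (by omega) hh.le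
      have h3 : (k + 1) * th = k * th + th := by ring
      linarith [heqn, hjmem.2, hr0, h2, h3]
    · exact hkt heq
    · have h2 : (((m / tw) / th) + 1) * th ≤ k * th :=
        mul_le_mul_of_nonneg_right (by omega) hh.le
      have h3 : (((m / tw) / th) + 1) * th = ((m / tw) / th) * th + th := by ring
      linarith [heqn, hjmem.1, hrlt, h2, h3]

-- The scatter loop of B computes pvTarget, by induction from the right end of the work area.
theorem pv_scatter (tiles th tw : Int) (hh : 0 < th) (hw : 0 < tw)
    (plain : List Int) (d0 : PySem.Dict Int (List (List Int))) (h0 : d0.items = pvTarget [] tiles th tw) :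
    (plain.length : Int) ≤ tiles * th * tw →
    ((PySem.List.enumerate plain).foldl
      (fun d p =>
        d.modify (PySem.Int.floordiv (PySem.Int.floordiv p.1 tw) th) []
          (fun rows => rows.modify (PySem.Int.mod (PySem.Int.floordiv p.1 tw) th).toNat
            (fun r => r ++ [p.2])))
      d0).items = pvTarget plain tiles th tw := by
  induction plain using List.reverseRecOn with
  | nil =>
    intro _
    simpa [PySem.List.enumerate_nil] using h0
  | append_singleton ys x IH =>
    intro hL
    have hm : ((ys.length : Int)) < tiles * th * tw := by
      have : ((ys ++ [x]).length : Int) = (ys.length : Int) + 1 := by simp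
      omega
    have hys := IH (by omega)
    rw [show (PySem.List.enumerate (ys ++ [x]) 0)
          = PySem.List.enumerate ys 0 ++ [((ys.length : Int), x)] by
        rw [PySem.List.enumerate_append]
        simp [PySem.List.enumerate_cons, PySem.List.enumerate_nil]]
    rw [List.foldl_append]
    simp only [List.foldl_cons, List.foldl_nil]
    rw [PySem.Int.floordiv_eq_ediv_of_pos hw, PySem.Int.floordiv_eq_ediv_of_pos hh,
        PySem.Int.mod_eq_emod_of_pos hh]
    exact pv_modify_step tiles th tw hh hw (ys.length : Int) (Int.natCast_nonneg _) hm ys x rfl _ hys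

-- The work area is never longer than tiles*th*tw elements.
theorem pv_slice_len_le (data : List Int) (s T : Int) (hT : 0 ≤ T) :
    ((PySem.List.slice data (some s) (some (s + T))).length : Int) ≤ T := by
  rw [PySem.List.length_slice]
  simp only [PySem.List.clampIdx]
  split_ifs <;> omega

-- In every degenerate case outside D_, all row slices are empty.
theorem pv_target_degenerate (plain : List Int) (tiles th tw : Int)
    (hg : ¬(0 < tiles ∧ 0 < th ∧ 0 < tw))
    (hlen : 0 < tiles → 0 < th → tw < 0 → (plain.length : Int) + tw ≤ 0) :
    pvTarget plain tiles th tw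
      = (PySem.List.pyRange 0 tiles 1).map (fun k => (k, (PySem.List.pyRange 0 th 1).map (fun _ => ([] : List Int)))) := by
  unfold pvTarget
  apply List.map_congr_left
  intro k hk
  have hkmem := (PySem.List.mem_pyRange_one).1 hk
  congr 1
  apply List.map_congr_left
  intro j hj
  have hjmem := (PySem.List.mem_pyRange_one).1 hj
  have htw : tw ≤ 0 := by
    by_contra hc
    exact hg ⟨by omega, by omega, by omega⟩
  apply List.eq_nil_of_length_eq_zero
  rw [PySem.List.length_slice]
  have hb : (k * th + j + 1) * tw = (k * th + j) * tw + tw := by ring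
  rw [hb]
  set a := (k * th + j) * tw with ha
  have hth : 0 < th := lt_of_le_of_lt hjmem.1 hjmem.2
  have htiles : 0 < tiles := lt_of_le_of_lt hkmem.1 hkmem.2
  have hrow0 : 0 ≤ k * th + j := by
    linarith [mul_nonneg hkmem.1 hth.le, hjmem.1]
  have h1 : a = 0 ∨ a ≤ tw := by
    rcases eq_or_lt_of_le hrow0 with h | h
    · left; rw [ha, ← h]; ring
    · right
      have h2 : (k * th + j - 1) * tw ≤ 0 :=
        mul_nonpos_of_nonneg_of_nonpos (by omega) htw
      nlinarith [h2]
  rcases lt_or_eq_of_le htw with htw' | htw'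
  · have hL' := hlen htiles hth htw'
    simp only [PySem.List.clampIdx]
    split_ifs <;> omega
  · rw [htw', add_zero]
    omega

-- B with a positive guard equals pvTarget; assembled equivalence outside D_.
theorem pv_B_eq (tiles : Int) (data : List Int) (tw th gh : Int)
    (hND : ¬ D_items_work_area tiles data tw th gh) :
    items_work_area_alt tiles data tw th gh
      = pvTarget (PySem.List.slice data (some (tw * gh)) (some (tw * gh + tiles * th * tw))) tiles th tw := by
  unfold items_work_area_alt
  simp only []
  by_cases hg : 0 < tiles ∧ 0 < th ∧ 0 < tw
  · rw [if_pos hg]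
    exact pv_scatter tiles th tw hg.2.1 hg.2.2 _ _ (pv_res0_target tiles th tw)
      (pv_slice_len_le data (tw * gh) (tiles * th * tw)
        (le_of_lt (mul_pos (mul_pos hg.1 hg.2.1) hg.2.2)))
  · rw [if_neg hg]
    rw [pv_res0_target tiles th tw]
    have hlen' : 0 < tiles → 0 < th → tw < 0 →
        ((PySem.List.slice data (some (tw * gh)) (some (tw * gh + tiles * th * tw))).length : Int) + tw ≤ 0 := by
      intro h1 h2 htw
      have hx : ¬ (0 < (PySem.List.clampIdx data.length (tw * gh + tiles * th * tw) : Int)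
          - (PySem.List.clampIdx data.length (tw * gh) : Int) + tw) := by
        intro hx
        exact hND ⟨h1, h2, htw, hx⟩
      rw [PySem.List.length_slice]
      omega
    rw [pv_target_degenerate _ tiles th tw hg hlen',
        pv_target_degenerate ([]) tiles th tw hg (by intro _ _ htw; simp; omega)]

-- ===== VERDICT (by name: the statements are the Claim_ definitions above) =====
theorem items_work_area_spec : Claim_unchanged_items_work_area := by
  intro tiles data tw th gh _
  unfold Spec_items_work_area
  intro hND
  rw [pv_A_eq_target, pv_B_eq tiles data tw th gh hND]

theorem items_work_area_changed : Claim_changed_items_work_area := by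
  unfold Claim_changed_items_work_area; decide

theorem items_work_area_tight : Claim_exact_items_work_area := by
  unfold Claim_exact_items_work_area
  intro tiles data tw th gh _ hD
  obtain ⟨h1, h2, h3, h4⟩ := hD
  rw [pv_A_eq_target]
  have hBalt : items_work_area_alt tiles data tw th gh = pvTarget [] tiles th tw := by
    unfold items_work_area_alt
    simp only []
    rw [if_neg (by rintro ⟨_, _, hc⟩; omega), pv_res0_target]
  rw [hBalt]
  intro heq
  have hlenplain : ((PySem.List.slice data (some (tw * gh)) (some (tw * gh + tiles * th * tw))).length : Int) + tw > 0 := by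
    rw [PySem.List.length_slice]; omega
  unfold pvTarget at heq
  rw [PySem.List.pyRange_one_cons h1, PySem.List.pyRange_one_cons h2] at heq
  simp only [List.map_cons, List.cons.injEq, Prod.mk.injEq, pv_slice_nil] at heq
  have hhead := heq.1.2.1
  have hl := congrArg List.length hhead
  have ha' : ((0:Int) * th + 0) * tw = 0 := by ring
  have hb' : ((0:Int) * th + 0 + 1) * tw = tw := by ring
  rw [ha', hb'] at hl
  simp only [List.length_nil] at hl
  rw [PySem.List.length_slice] at hl
  have hc0 : PySem.List.clampIdx (PySem.List.slice data (some (tw * gh)) (some (tw * gh + tiles * th * tw))).length 0 = 0 := by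
    simp [PySem.List.clampIdx]
  have hcw : (PySem.List.clampIdx (PySem.List.slice data (some (tw * gh)) (some (tw * gh + tiles * th * tw))).length tw : Int)
      = ((PySem.List.slice data (some (tw * gh)) (some (tw * gh + tiles * th * tw))).length : Int) + tw := by
    simp only [PySem.List.clampIdx]
    split_ifs <;> omega
  omega
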